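-- pv_equiv track=rewrite | github.com/openlabollioules/NL2SQL | backend/app/services/schema_tools.py | _find_similar_name
-- ===== SOURCE A (Python) =====
-- from typing import Dict, List, Optional, Tuple
--
-- def _find_similar_name(name: str, candidates: List[str]) -> Optional[str]:
--     """Find the most similar name from candidates."""
--     name_lower = name.lower()
--
--     # Exact match (case insensitive)
--     for c in candidates:
--         if c.lower() == name_lower:
--             return c
--
--     # Partial match
--     for c in candidates:
--         if name_lower in c.lower() or c.lower() in name_lower:
--             return c
--
--     return None
-- ===== SOURCE B (Python) =====
-- from typing import List, Optional
--
-- def _find_similar_name(name: str, candidates: List[str]) -> Optional[str]: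
--     """One pass: return immediately on exact match, else remember the first partial."""
--     name_lower = name.lower()
--     first_partial = None
--     for c in candidates:
--         cl = c.lower()
--         if cl == name_lower:
--             return c
--         if first_partial is None and (name_lower in cl or cl in name_lower):
--             first_partial = c
--     return first_partial
-- ===== Notes on version B (the rewrite author's own statement) =====
-- stated objective: alternative
-- what changed: Replaces A's two sequential full scans (exact pass then partial pass) with a single loop that returns early on an exact match and carries a first_partial accumulator as fallback.
import Mathlib
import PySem

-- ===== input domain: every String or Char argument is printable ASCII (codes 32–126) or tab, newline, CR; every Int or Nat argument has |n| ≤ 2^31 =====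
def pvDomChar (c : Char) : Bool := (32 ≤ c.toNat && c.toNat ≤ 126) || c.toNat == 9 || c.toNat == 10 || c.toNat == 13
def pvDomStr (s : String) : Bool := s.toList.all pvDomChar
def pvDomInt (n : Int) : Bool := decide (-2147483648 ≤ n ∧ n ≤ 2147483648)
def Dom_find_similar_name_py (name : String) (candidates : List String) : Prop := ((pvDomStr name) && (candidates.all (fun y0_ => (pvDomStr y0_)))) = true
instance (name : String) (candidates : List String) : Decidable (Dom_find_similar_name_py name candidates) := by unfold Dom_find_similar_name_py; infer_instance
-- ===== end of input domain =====

-- ===== PORT A =====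
-- B replaces A's two sequential scans by one early-returning loop with a first-partial accumulator (objective: alternative).

-- first loop of A: exact (case-insensitive) match
def pvExactLoop (nl : String) : List String → Option String
  | [] => none
  | c :: rest => if PySem.Str.lower c == nl then some c else pvExactLoop nl rest

-- second loop of A: partial match
def pvPartialLoop (nl : String) : List String → Option String
  | [] => none
  | c :: rest =>
    if PySem.Str.isIn nl (PySem.Str.lower c) || PySem.Str.isIn (PySem.Str.lower c) nl then some c
    else pvPartialLoop nl rest

def find_similar_name_py (name : String) (candidates : List String) : Option String :=
  let nl := PySem.Str.lower name
  match pvExactLoop nl candidates with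
  | some c => some c
  | none => pvPartialLoop nl candidates

-- ===== PORT B =====
-- B's single loop, carrying the first recorded partial match
def pvAltLoop (nl : String) (fp : Option String) : List String → Option String
  | [] => fp
  | c :: rest =>
    let cl := PySem.Str.lower c
    if cl == nl then some c
    else if fp.isNone && (PySem.Str.isIn nl cl || PySem.Str.isIn cl nl) then
      pvAltLoop nl (some c) rest
    else pvAltLoop nl fp rest

def find_similar_name_py_alt (name : String) (candidates : List String) : Option String :=
  pvAltLoop (PySem.Str.lower name) none candidates

-- ===== PRECONDITION & SPEC =====
def Spec_find_similar_name_py (name : String) (candidates : List String) (out : Option String) : Prop := out = find_similar_name_py_alt name candidates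
instance (name : String) (candidates : List String) (out : Option String) : Decidable (Spec_find_similar_name_py name candidates out) := by unfold Spec_find_similar_name_py; infer_instance

-- ===== CLAIM =====
def Claim_equal_find_similar_name_py : Prop := ∀ (name : String) (candidates : List String), Dom_find_similar_name_py name candidates → Spec_find_similar_name_py name candidates (find_similar_name_py name candidates)

-- ===== LEMMAS AND PROOFS =====

theorem pvAltLoop_eq (nl : String) (fp : Option String) (cs : List String) :
    pvAltLoop nl fp cs =
      match pvExactLoop nl cs with
      | some c => some c
      | none => match fp with
                | some p => some p
                | none => pvPartialLoop nl cs := by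
  induction cs generalizing fp with
  | nil => cases fp <;> simp [pvAltLoop, pvExactLoop, pvPartialLoop]
  | cons c rest ih =>
    simp only [pvAltLoop, pvExactLoop, pvPartialLoop]
    by_cases he : (PySem.Str.lower c == nl) = true
    · simp [he]
    · simp only [he, Bool.false_eq_true, if_false]
      cases fp with
      | some p =>
        simp only [Option.isNone_some, Bool.false_and, Bool.false_eq_true, if_false, ih]
        try (cases pvExactLoop nl rest <;> rfl)
      | none =>
        by_cases hp : (PySem.Str.isIn nl (PySem.Str.lower c) || PySem.Str.isIn (PySem.Str.lower c) nl) = true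
        · simp only [Option.isNone_none, Bool.true_and, hp, if_true, ih]
          try (cases pvExactLoop nl rest <;> rfl)
        · simp only [Option.isNone_none, Bool.true_and, hp, Bool.false_eq_true, if_false, ih,
            Bool.not_eq_true] at *
          try simp only [hp, Bool.false_eq_true, if_false]

-- ===== VERDICT =====
theorem find_similar_name_py_spec : Claim_equal_find_similar_name_py := by
  intro name candidates _
  unfold Spec_find_similar_name_py find_similar_name_py find_similar_name_py_alt
  rw [pvAltLoop_eq]
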